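-- pv_equiv track=rewrite | github.com/frougon/FFGo | src/gui/mainwindow.py | mergeFGOptions
-- ===== SOURCE A (Python) =====
-- def mergeFGOptions(mergedOptions, optionList):
--     """Merge identical options in 'optionList'.
--
--     Return a new list containing all options from 'optionList',
--     except that the elements of 'optionList' that start with an
--     element of 'mergedOptions' are merged together.
--
--     More precisely, for a given element e (a string) of
--     'mergedOptions', the first element of 'optionList' that starts
--     with e is replaced by the last element of 'optionList' that
--     starts with e and all other such elements of 'optionList' are
--     omitted from the result. In other words, the last element of
--     'optionList' that starts with e "wins", replaces the first one,
--     and other occurrences are ignored.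
--
--     """
--     d = {}
--     l = []
--
--     for opt in optionList:
--         for prefix in mergedOptions:
--             if opt.startswith(prefix):
--                 if prefix not in d: # first time we encounter this prefix?
--                     l.append( (False, prefix) )
--                 d[prefix] = opt # overwrites previous ones
--                 break
--         else:
--             l.append( (True, opt) )  # non-merged option
--
--     # If isOpt is False, s is a prefix and d[s] the last element of
--     # optionList starting with that prefix.
--     return [ s if isOpt else d[s] for isOpt, s in l ]
-- ===== SOURCE B (Python) =====
-- def mergeFGOptions(mergedOptions, optionList):
--     def first_match(opt):
--         for prefix in mergedOptions:
--             if opt.startswith(prefix):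
--                 return prefix
--         return None
--
--     result = []
--     # work list of (option, its first-matching prefix or None); each match computed once
--     remaining = [(opt, first_match(opt)) for opt in optionList]
--     while remaining:
--         (opt, p), remaining = remaining[0], remaining[1:]
--         if p is None:
--             result.append(opt)
--         else:
--             winner = opt
--             for x, q in remaining:
--                 if q == p:
--                     winner = x
--             result.append(winner)
--             remaining = [(x, q) for x, q in remaining if q != p]
--     return result
-- ===== Notes on version B (the rewrite author's own statement) =====
-- stated objective: alternative
-- what changed: Selection-style rewrite with no dict, no placeholder list and no seen-set: B repeatedly pops the head of a work list of (option, cached first-matching prefix) pairs, and when the head matches a prefix it scans the rest for the last option with the same prefix (the winner), emits it, and filters all same-prefix options out of the work list before continuing.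
import Mathlib
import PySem

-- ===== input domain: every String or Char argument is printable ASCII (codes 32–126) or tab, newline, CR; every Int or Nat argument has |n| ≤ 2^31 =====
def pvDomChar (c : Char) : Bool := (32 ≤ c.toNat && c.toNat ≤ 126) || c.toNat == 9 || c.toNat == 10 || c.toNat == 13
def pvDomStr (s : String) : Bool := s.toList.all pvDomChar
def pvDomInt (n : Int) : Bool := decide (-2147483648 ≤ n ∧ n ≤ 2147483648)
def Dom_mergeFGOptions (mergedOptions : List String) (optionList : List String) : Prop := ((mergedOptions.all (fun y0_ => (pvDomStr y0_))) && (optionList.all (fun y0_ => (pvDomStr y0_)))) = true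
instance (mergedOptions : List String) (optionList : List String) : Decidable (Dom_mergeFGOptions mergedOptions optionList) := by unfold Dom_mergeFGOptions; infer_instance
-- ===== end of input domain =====

-- B is a selection-style rewrite with no dict, no placeholder list and no seen-set: it repeatedly
-- pops the head of the work list and, when it matches a prefix, scans the remainder for the last
-- option with the same first-matching prefix, emits it and filters same-prefix options out of the
-- work list; prefix matches are computed once per option on entry. Same results, different
-- algorithm (B is quadratic in the worst case, not faster).

-- ===== PORT A =====
-- the inner 'for prefix in mergedOptions: … break / else' loop: returns the first matching prefix
def pvA_findPrefix (mergedOptions : List String) (opt : String) : Option String :=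
  match mergedOptions with
  | [] => none
  | p :: rest => if PySem.Str.startswith opt p then some p else pvA_findPrefix rest opt

-- the main 'for opt in optionList' loop carrying (d, l)
def pvA_loop (mergedOptions : List String) (opts : List String)
    (d : PySem.Dict String String) (l : List (Bool × String)) :
    PySem.Dict String String × List (Bool × String) :=
  match opts with
  | [] => (d, l)
  | opt :: rest =>
    match pvA_findPrefix mergedOptions opt with
    | some p =>
        let l' := if d.contains p then l else l ++ [(false, p)]
        pvA_loop mergedOptions rest (d.insert p opt) l'
    | none => pvA_loop mergedOptions rest d (l ++ [(true, opt)])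

def mergeFGOptions (mergedOptions : List String) (optionList : List String) : List String :=
  let (d, l) := pvA_loop mergedOptions optionList PySem.Dict.empty []
  -- d[s]: the key s is always present when isOpt = false, so getD never takes its default
  l.map (fun p => if p.1 then p.2 else d.getD p.2 "")

-- ===== PORT B =====
-- first_match helper of Source B
def pvB_firstMatch (mergedOptions : List String) (opt : String) : Option String :=
  match mergedOptions with
  | [] => none
  | p :: rest => if PySem.Str.startswith opt p then some p else pvB_firstMatch rest opt

-- the 'while remaining' loop of Source B, over (option, cached first-matching prefix) pairs,
-- carrying (remaining, result)
def pvB_goP (remaining : List (String × Option String)) (result : List String) : List String :=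
  match remaining with
  | [] => result
  | (opt, p?) :: rest =>
    match p? with
    | none => pvB_goP rest (result ++ [opt])
    | some p =>
        -- 'winner' scan over the remainder
        let winner := rest.foldl (fun w xq => if xq.2 == some p then xq.1 else w) opt
        -- drop every pair whose cached prefix is p, then continue
        pvB_goP (rest.filter (fun xq => !(xq.2 == some p))) (result ++ [winner])
termination_by remaining.length
decreasing_by
  · simp
  · simpa using Nat.lt_succ_of_le (le_trans (List.length_filter_le _ _) (by simp))

def mergeFGOptions_alt (mergedOptions : List String) (optionList : List String) : List String :=
  pvB_goP (optionList.map (fun opt => (opt, pvB_firstMatch mergedOptions opt))) []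

-- ===== PRECONDITION & SPEC =====
def Spec_mergeFGOptions (mergedOptions : List String) (optionList : List String) (out : List String) : Prop := out = mergeFGOptions_alt mergedOptions optionList
instance (mergedOptions : List String) (optionList : List String) (out : List String) : Decidable (Spec_mergeFGOptions mergedOptions optionList out) := by unfold Spec_mergeFGOptions; infer_instance

-- ===== CLAIM (what is proved, stated in full; the proofs are below) =====
def Claim_equal_mergeFGOptions : Prop := ∀ (mergedOptions : List String) (optionList : List String), Dom_mergeFGOptions mergedOptions optionList → Spec_mergeFGOptions mergedOptions optionList (mergeFGOptions mergedOptions optionList)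

-- ===== LEMMAS AND PROOFS =====

-- proof-side helper: B's loop specialised to raw options (pvB_goP over the cached pairs
-- computes exactly this)
def pvB_go (mergedOptions : List String) (remaining : List String) (result : List String) :
    List String :=
  match remaining with
  | [] => result
  | opt :: rest =>
    match pvB_firstMatch mergedOptions opt with
    | none => pvB_go mergedOptions rest (result ++ [opt])
    | some p =>
        let winner := rest.foldl (fun w x => if pvB_firstMatch mergedOptions x == some p then x else w) opt
        pvB_go mergedOptions (rest.filter (fun x => !(pvB_firstMatch mergedOptions x == some p)))
          (result ++ [winner])
termination_by remaining.length
decreasing_by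
  · simp
  · simpa using Nat.lt_succ_of_le (le_trans (List.length_filter_le _ _) (by simp))

-- pvB_goP on the cached (option, match) pairs is pvB_go on the options
theorem pvB_goP_eq_go (m : List String) : ∀ (n : Nat) (l res : List String), l.length ≤ n →
    pvB_goP (l.map (fun x => (x, pvB_firstMatch m x))) res = pvB_go m l res := by
  intro n
  induction n with
  | zero =>
    intro l res h
    have : l = [] := List.eq_nil_of_length_eq_zero (Nat.le_zero.mp h)
    subst this
    simp [pvB_goP, pvB_go]
  | succ n ih =>
    intro l res hlen
    match l with
    | [] => simp [pvB_goP, pvB_go]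
    | x :: rest =>
      have hrlen : rest.length ≤ n := Nat.lt_succ_iff.mp (by simpa using hlen)
      rw [List.map_cons, pvB_goP.eq_def, pvB_go]
      cases h : pvB_firstMatch m x with
      | none =>
        dsimp only
        exact ih rest _ hrlen
      | some p =>
        dsimp only
        rw [List.foldl_map, List.filter_map]
        have hcomp : ((fun xq : String × Option String => !(xq.2 == some p)) ∘
            (fun x => (x, pvB_firstMatch m x))) =
            (fun x => !(pvB_firstMatch m x == some p)) := rfl
        rw [hcomp, ih (rest.filter _) _ (le_trans (List.length_filter_le _ _) hrlen)]


theorem find_eq (m : List String) (opt : String) :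
    pvB_firstMatch m opt = pvA_findPrefix m opt := by
  induction m with
  | nil => rfl
  | cons p rest ih => simp [pvB_firstMatch, pvA_findPrefix, ih]

-- A's loop only appends to l, and its dict component ignores l
theorem pvA_loop_append (m : List String) (opts : List String)
    (d : PySem.Dict String String) (l : List (Bool × String)) :
    pvA_loop m opts d l = ((pvA_loop m opts d []).1, l ++ (pvA_loop m opts d []).2) := by
  induction opts generalizing d l with
  | nil => simp [pvA_loop]
  | cons opt rest ih =>
    simp only [pvA_loop]
    cases h : pvA_findPrefix m opt with
    | none =>
      rw [ih d (l ++ [(true, opt)]), ih d ([] ++ [(true, opt)]), ih d []]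
      simp
    | some p =>
      cases hc : PySem.Dict.contains d p with
      | true =>
        simp only [hc, if_true]
        rw [ih (d.insert p opt) l]
      | false =>
        simp only [hc, Bool.false_eq_true, if_false]
        rw [ih (d.insert p opt) (l ++ [(false, p)]), ih (d.insert p opt) ([] ++ [(false, p)]),
            ih (d.insert p opt) []]
        simp

-- accumulator lemma for B's loop
theorem pvB_go_append_aux (m : List String) : ∀ (n : Nat) (rem res : List String),
    rem.length ≤ n → pvB_go m rem res = res ++ pvB_go m rem [] := by
  intro n
  induction n with
  | zero =>
    intro rem res h
    have : rem = [] := List.eq_nil_of_length_eq_zero (Nat.le_zero.mp h)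
    subst this; simp [pvB_go]
  | succ n ih =>
    intro rem res hlen
    match rem with
    | [] => simp [pvB_go]
    | opt :: rest =>
      have hrlen : rest.length ≤ n := Nat.lt_succ_iff.mp (by simpa using hlen)
      rw [pvB_go, pvB_go]
      cases h : pvB_firstMatch m opt with
      | none =>
        dsimp only
        rw [ih rest _ hrlen, ih rest ([] ++ [opt]) hrlen]
        simp
      | some p =>
        dsimp only
        rw [ih (rest.filter _) _ (le_trans (List.length_filter_le _ _) hrlen),
            ih (rest.filter _) ([] ++ _) (le_trans (List.length_filter_le _ _) hrlen)]
        simp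

theorem pvB_go_append (m : List String) (rem : List String) (res : List String) :
    pvB_go m rem res = res ++ pvB_go m rem [] :=
  pvB_go_append_aux m rem.length rem res le_rfl

-- two dicts agreeing away from p
def AgreeOff (p : String) (d₁ d₂ : PySem.Dict String String) : Prop :=
  ∀ q, q ≠ p → d₁.contains q = d₂.contains q ∧ d₁.getD q "" = d₂.getD q ""

theorem agreeOff_insert {p : String} {d₁ d₂ : PySem.Dict String String}
    (h : AgreeOff p d₁ d₂) (q : String) (v : String) :
    AgreeOff p (d₁.insert q v) (d₂.insert q v) := by
  intro r hr
  rcases h r hr with ⟨h1, h2⟩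
  constructor
  · rw [PySem.Dict.contains_insert, PySem.Dict.contains_insert, h1]
  · rw [PySem.Dict.getD_insert, PySem.Dict.getD_insert, h2]

-- the final value of key p after A's loop is the last option matching p
theorem final_getD (m : List String) (opts : List String) (p : String) :
    ∀ d : PySem.Dict String String, d.contains p = true →
    (pvA_loop m opts d []).1.getD p "" =
      opts.foldl (fun w x => if pvA_findPrefix m x = some p then x else w) (d.getD p "") := by
  induction opts with
  | nil => intro d _; simp [pvA_loop]
  | cons opt rest ih =>
    intro d hd
    simp only [pvA_loop, List.foldl_cons]
    cases h : pvA_findPrefix m opt with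
    | none =>
      simp only []
      rw [pvA_loop_append m rest d ([] ++ [(true, opt)])]
      exact ih d hd
    | some q =>
      have hc : ((d.insert q opt)).contains p = true := by
        rw [PySem.Dict.contains_insert]; simp [hd]
      cases hdc : PySem.Dict.contains d q with
      | true =>
        simp only [hdc, if_true]
        rw [ih (d.insert q opt) hc, PySem.Dict.getD_insert]
        by_cases hq : q = p
        · subst hq; simp
        · have : p ≠ q := fun hh => hq hh.symm
          simp [this, hq]
      | false =>
        simp only [hdc, Bool.false_eq_true, if_false]
        rw [pvA_loop_append m rest (d.insert q opt) ([] ++ [(false, q)])]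
        simp only []
        rw [ih (d.insert q opt) hc, PySem.Dict.getD_insert]
        by_cases hq : q = p
        · subst hq; simp
        · have : p ≠ q := fun hh => hq hh.symm
          simp [this, hq]

-- every deferred placeholder produced from a dict already containing p names a prefix ≠ p
theorem placeholders_ne (m : List String) (opts : List String) (p : String) :
    ∀ d : PySem.Dict String String, d.contains p = true →
    ∀ q, (false, q) ∈ (pvA_loop m opts d []).2 → q ≠ p := by
  induction opts with
  | nil => intro d _ q hq; simp [pvA_loop] at hq
  | cons opt rest ih =>
    intro d hd q hq
    simp only [pvA_loop] at hq
    cases h : pvA_findPrefix m opt with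
    | none =>
      rw [h] at hq
      rw [pvA_loop_append m rest d ([] ++ [(true, opt)])] at hq
      simp only [List.nil_append, List.cons_append, List.mem_cons] at hq
      rcases hq with hq | hq
      · cases hq
      · exact ih d hd q hq
    | some r =>
      rw [h] at hq
      have hc : ((d.insert r opt)).contains p = true := by
        rw [PySem.Dict.contains_insert]; simp [hd]
      cases hdc : PySem.Dict.contains d r with
      | true =>
        simp only [hdc, if_true] at hq
        exact ih (d.insert r opt) hc q hq
      | false =>
        simp only [hdc, Bool.false_eq_true, if_false] at hq
        rw [pvA_loop_append m rest (d.insert r opt) ([] ++ [(false, r)])] at hq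
        simp only [List.nil_append, List.cons_append, List.mem_cons] at hq
        rcases hq with hq | hq
        · cases hq
          intro hrp
          subst hrp
          rw [hd] at hdc; cases hdc
        · exact ih (d.insert r opt) hc q hq

-- running A's loop on opts from d₁ (with p present) produces the same placeholder list as running
-- it on opts with the p-matching options filtered out from d₂, and the final dicts agree off p
theorem run_filter (m : List String) (p : String) (opts : List String) :
    ∀ d₁ d₂ : PySem.Dict String String, d₁.contains p = true → AgreeOff p d₁ d₂ →
    (pvA_loop m opts d₁ []).2 =
      (pvA_loop m (opts.filter (fun x => !(pvA_findPrefix m x == some p))) d₂ []).2 ∧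
    AgreeOff p (pvA_loop m opts d₁ []).1
      (pvA_loop m (opts.filter (fun x => !(pvA_findPrefix m x == some p))) d₂ []).1 := by
  induction opts with
  | nil => intro d₁ d₂ _ ha; exact ⟨rfl, ha⟩
  | cons opt rest ih =>
    intro d₁ d₂ hd ha
    simp only [List.filter_cons]
    cases h : pvA_findPrefix m opt with
    | none =>
      simp only [Option.none_beq_some, Bool.not_false, if_true]
      simp only [pvA_loop, h]
      rw [pvA_loop_append m rest d₁ ([] ++ [(true, opt)]),
          pvA_loop_append m (rest.filter _) d₂ ([] ++ [(true, opt)])]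
      rcases ih d₁ d₂ hd ha with ⟨h1, h2⟩
      exact ⟨by simp [h1], h2⟩
    | some q =>
      by_cases hq : q = p
      · subst hq
        simp only [beq_self_eq_true, Bool.not_true]
        simp only [pvA_loop, h, hd, if_true]
        have hc : ((d₁.insert q opt)).contains q = true := by
          rw [PySem.Dict.contains_insert]; simp
        have ha' : AgreeOff q (d₁.insert q opt) d₂ := by
          intro r hr
          rcases ha r hr with ⟨h1, h2⟩
          constructor
          · rw [PySem.Dict.contains_insert]; simp [hr, h1]
          · rw [PySem.Dict.getD_insert]; simp [hr, h2]
        exact ih (d₁.insert q opt) d₂ hc ha'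
      · have hbq : (pvA_findPrefix m opt == some p) = false := by
          simp [h, hq]
        have hcond : (!((some q : Option String) == some p)) = true := by simp [hq]
        rw [if_pos hcond]
        simp only [pvA_loop, h]
        have hcq : d₁.contains q = d₂.contains q := (ha q hq).1
        have hc : ((d₁.insert q opt)).contains p = true := by
          rw [PySem.Dict.contains_insert]; simp [hd]
        have ha' : AgreeOff p (d₁.insert q opt) (d₂.insert q opt) := agreeOff_insert ha q opt
        cases hdc : PySem.Dict.contains d₁ q with
        | true =>
          rw [← hcq, hdc]
          simp only [if_true]
          exact ih (d₁.insert q opt) (d₂.insert q opt) hc ha'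
        | false =>
          rw [← hcq, hdc]
          simp only [Bool.false_eq_true, if_false]
          rw [pvA_loop_append m rest (d₁.insert q opt) ([] ++ [(false, q)]),
              pvA_loop_append m (rest.filter _) (d₂.insert q opt) ([] ++ [(false, q)])]
          rcases ih (d₁.insert q opt) (d₂.insert q opt) hc ha' with ⟨h1, h2⟩
          exact ⟨by simp [h1], h2⟩

-- resolving a placeholder list through two dicts that agree off p gives the same output,
-- provided no placeholder names p
theorem resolve_congr (p : String) (l : List (Bool × String))
    (d₁ d₂ : PySem.Dict String String) (ha : AgreeOff p d₁ d₂)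
    (hl : ∀ q, (false, q) ∈ l → q ≠ p) :
    l.map (fun pr => if pr.1 then pr.2 else d₁.getD pr.2 "") =
    l.map (fun pr => if pr.1 then pr.2 else d₂.getD pr.2 "") := by
  induction l with
  | nil => rfl
  | cons pr rest ih =>
    simp only [List.map_cons]
    congr 1
    · rcases pr with ⟨b, s⟩
      cases b with
      | true => rfl
      | false =>
        have hs : s ≠ p := hl s (by simp)
        simp [(ha s hs).2]
    · exact ih (fun q hq => hl q (List.mem_cons_of_mem _ hq))

-- running A from the singleton dict {p ↦ opt} on a p-free list is the same as running it from ∅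
theorem run_drop_p (m : List String) (p : String) (opts : List String)
    (hfree : ∀ x ∈ opts, (pvA_findPrefix m x == some p) = false) :
    ∀ d₁ d₂ : PySem.Dict String String, AgreeOff p d₁ d₂ →
    (pvA_loop m opts d₁ []).2 = (pvA_loop m opts d₂ []).2 ∧
    AgreeOff p (pvA_loop m opts d₁ []).1 (pvA_loop m opts d₂ []).1 := by
  induction opts with
  | nil => intro d₁ d₂ ha; exact ⟨rfl, ha⟩
  | cons x rest ih =>
    intro d₁ d₂ ha
    have hx := hfree x (by simp)
    have hrest : ∀ y ∈ rest, (pvA_findPrefix m y == some p) = false :=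
      fun y hy => hfree y (List.mem_cons_of_mem _ hy)
    simp only [pvA_loop]
    cases h : pvA_findPrefix m x with
    | none =>
      dsimp only
      rw [pvA_loop_append m rest d₁ ([] ++ [(true, x)]),
          pvA_loop_append m rest d₂ ([] ++ [(true, x)])]
      rcases ih hrest d₁ d₂ ha with ⟨h1, h2⟩
      exact ⟨by simp [h1], h2⟩
    | some q =>
      have hq : q ≠ p := by
        intro hqp; subst hqp
        rw [h] at hx; simp at hx
      have hcq : d₁.contains q = d₂.contains q := (ha q hq).1
      have ha' : AgreeOff p (d₁.insert q x) (d₂.insert q x) := agreeOff_insert ha q x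
      dsimp only
      cases hdc : PySem.Dict.contains d₁ q with
      | true =>
        rw [← hcq, hdc]
        simp only [if_true]
        exact ih hrest (d₁.insert q x) (d₂.insert q x) ha'
      | false =>
        rw [← hcq, hdc]
        simp only [Bool.false_eq_true, if_false]
        rw [pvA_loop_append m rest (d₁.insert q x) ([] ++ [(false, q)]),
            pvA_loop_append m rest (d₂.insert q x) ([] ++ [(false, q)])]
        rcases ih hrest (d₁.insert q x) (d₂.insert q x) ha' with ⟨h1, h2⟩
        exact ⟨by simp [h1], h2⟩

-- A's full run resolved, as a function of the start dict
def pvA_run (m : List String) (opts : List String) (d : PySem.Dict String String) : List String :=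
  ((pvA_loop m opts d []).2).map
    (fun pr => if pr.1 then pr.2 else (pvA_loop m opts d []).1.getD pr.2 "")

-- main induction: A's resolved run from ∅ satisfies B's recursion
theorem run_eq_go (m : List String) : ∀ n (opts : List String), opts.length ≤ n →
    pvA_run m opts PySem.Dict.empty = pvB_go m opts [] := by
  intro n
  induction n with
  | zero =>
    intro opts h
    have : opts = [] := List.eq_nil_of_length_eq_zero (Nat.le_zero.mp h)
    subst this
    simp [pvA_run, pvA_loop, pvB_go]
  | succ n ih =>
    intro opts hlen
    match opts with
    | [] => simp [pvA_run, pvA_loop, pvB_go]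
    | opt :: rest =>
      have hrlen : rest.length ≤ n := Nat.lt_succ_iff.mp (by simpa using hlen)
      rw [pvB_go]
      rw [find_eq]
      cases h : pvA_findPrefix m opt with
      | none =>
        dsimp only
        rw [pvB_go_append]
        unfold pvA_run
        simp only [pvA_loop, h]
        rw [pvA_loop_append m rest PySem.Dict.empty ([] ++ [(true, opt)])]
        simp only [List.nil_append, List.cons_append, List.map_cons, if_true]
        rw [← pvA_run, ih rest hrlen]
      | some p =>
        dsimp only
        rw [pvB_go_append]
        unfold pvA_run
        simp only [pvA_loop, h, PySem.Dict.contains_empty, Bool.false_eq_true, if_false]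
        rw [pvA_loop_append m rest (PySem.Dict.empty.insert p opt) ([] ++ [(false, p)])]
        simp only [List.nil_append, List.cons_append, List.map_cons, Bool.false_eq_true,
          if_false]
        have hcp : ((PySem.Dict.empty : PySem.Dict String String).insert p opt).contains p = true := by
          rw [PySem.Dict.contains_insert]; simp
        -- head: the winner
        have hhead : (pvA_loop m rest (PySem.Dict.empty.insert p opt) []).1.getD p "" =
            rest.foldl (fun w x => if pvB_firstMatch m x == some p then x else w) opt := by
          rw [final_getD m rest p _ hcp, PySem.Dict.getD_insert]
          rw [if_pos rfl]
          congr 1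
          funext w x
          rw [find_eq]
          by_cases hx : pvA_findPrefix m x = some p
          · simp [hx]
          · simp [hx]
        -- tail: the filtered recursive call
        have hfilter : rest.filter (fun x => !(pvB_firstMatch m x == some p)) =
            rest.filter (fun x => !(pvA_findPrefix m x == some p)) := by
          congr 1; funext x; rw [find_eq]
        set rest' := rest.filter (fun x => !(pvA_findPrefix m x == some p)) with hrest'
        have hfree : ∀ x ∈ rest', (pvA_findPrefix m x == some p) = false := by
          intro x hx
          rw [hrest'] at hx
          have := List.of_mem_filter hx
          simpa using this
        rcases run_filter m p rest (PySem.Dict.empty.insert p opt) (PySem.Dict.empty.insert p opt)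
          hcp (fun q _ => ⟨rfl, rfl⟩) with ⟨hL, hA⟩
        have hne1 := placeholders_ne m rest p (PySem.Dict.empty.insert p opt) hcp
        have hr1 : (pvA_loop m rest (PySem.Dict.empty.insert p opt) []).2.map
            (fun pr => if pr.1 then pr.2
              else (pvA_loop m rest (PySem.Dict.empty.insert p opt) []).1.getD pr.2 "") =
            pvA_run m rest' (PySem.Dict.empty.insert p opt) := by
          unfold pvA_run
          rw [hL]
          exact resolve_congr p _ _ _ hA (fun q hq => hne1 q (by rw [hL]; exact hq))
        have hAgree0 : AgreeOff p ((PySem.Dict.empty : PySem.Dict String String).insert p opt)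
            PySem.Dict.empty := by
          intro q hq
          constructor
          · rw [PySem.Dict.contains_insert]; simp [hq]
          · rw [PySem.Dict.getD_insert]; simp [hq]
        rcases run_drop_p m p rest' hfree _ _ hAgree0 with ⟨hL2, hA2⟩
        have hne2 : ∀ q, (false, q) ∈ (pvA_loop m rest' (PySem.Dict.empty.insert p opt) []).2 → q ≠ p := by
          intro q hq
          apply hne1 q
          rw [hL]; exact hq
        have hr2 : pvA_run m rest' (PySem.Dict.empty.insert p opt) =
            pvA_run m rest' PySem.Dict.empty := by
          unfold pvA_run
          rw [hL2]
          exact resolve_congr p _ _ _ hA2 (fun q hq => hne2 q (by rw [hL2]; exact hq))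
        have hrlen' : rest'.length ≤ n :=
          le_trans (List.length_filter_le _ _) hrlen
        rw [hhead, hr1, hr2, ih rest' hrlen', hfilter]

-- ===== VERDICT (by name: the statement is the Claim_ definition above) =====
theorem mergeFGOptions_spec : Claim_equal_mergeFGOptions := by
  intro m o _
  show mergeFGOptions m o = mergeFGOptions_alt m o
  have : mergeFGOptions m o = pvA_run m o PySem.Dict.empty := by
    unfold mergeFGOptions pvA_run
    rfl
  rw [this, mergeFGOptions_alt, pvB_goP_eq_go m o.length o [] le_rfl,
      run_eq_go m o.length o le_rfl]
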